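-- pv_equiv track=rewrite | github.com/LeslieMiau/nanobot | nanobot/providers/custom_provider.py | _normalize_model_for_route
-- ===== SOURCE A (Python) =====
-- def _normalize_model_for_route(model: str, route: str) -> str:
--     normalized = model
--     while "/" in normalized:
--         prefix, rest = normalized.split("/", 1)
--         normalized_prefix = prefix.lower().replace("-", "_")
--         if normalized_prefix == "aicodewith":
--             normalized = rest
--             continue
--         if route == "anthropic" and normalized_prefix in {"anthropic", "claude"}:
--             normalized = rest
--             continue
--         if route == "gemini" and normalized_prefix in {"gemini", "google"}:
--             normalized = rest
--             continue
--         if route == "openai" and normalized_prefix in {"openai", "chatgpt"}: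
--             normalized = rest
--             continue
--         break
--     return normalized
-- ===== SOURCE B (Python) =====
-- _ROUTE_PREFIXES = frozenset({
--     ("anthropic", "anthropic"), ("anthropic", "claude"),
--     ("gemini", "gemini"), ("gemini", "google"),
--     ("openai", "openai"), ("openai", "chatgpt"),
-- })
--
--
-- def _normalize_model_for_route(model: str, route: str) -> str:
--     parts = model.split("/")
--     i = 0
--     while i < len(parts) - 1:
--         seg = parts[i].lower().replace("-", "_")
--         if seg != "aicodewith" and (route, seg) not in _ROUTE_PREFIXES:
--             break
--         i += 1
--     return "/".join(parts[i:])
-- ===== Notes on version B (the rewrite author's own statement) =====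
-- stated objective: alternative
-- what changed: B splits the model into its slash-separated segments once and advances an index past allowed route prefixes (checked against one (route, prefix) set), then joins the remaining segments, instead of A's repeated split-and-reassign of the shrinking string.
import Mathlib
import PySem

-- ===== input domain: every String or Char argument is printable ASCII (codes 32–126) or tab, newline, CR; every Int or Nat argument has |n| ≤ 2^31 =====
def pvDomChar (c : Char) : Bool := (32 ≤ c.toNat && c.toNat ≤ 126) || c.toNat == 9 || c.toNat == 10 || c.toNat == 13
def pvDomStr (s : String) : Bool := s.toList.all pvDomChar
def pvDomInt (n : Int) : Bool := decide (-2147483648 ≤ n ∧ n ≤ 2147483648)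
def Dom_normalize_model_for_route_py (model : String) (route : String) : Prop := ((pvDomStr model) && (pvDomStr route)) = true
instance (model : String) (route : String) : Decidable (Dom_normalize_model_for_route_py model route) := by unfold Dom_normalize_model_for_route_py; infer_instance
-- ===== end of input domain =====

-- B splits the model once into segments, advances an index past allowed prefixes and joins the
-- remainder, instead of A's repeated split of the shrinking string (objective: alternative).

-- shared normalization of one segment: seg.lower().replace("-", "_")
def pvNormSeg (p : List Char) : List Char :=
  PySem.Chars.replace (PySem.Chars.lower p) ['-'] ['_']

-- ===== PORT A =====
-- A's while loop; the Nat argument is a totality guard only (each iteration strictly shortens the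
-- string, so `length + 1` fuel is never exhausted).
def pvALoop (route : String) : Nat → List Char → List Char
  | 0, cs => cs
  | fuel + 1, cs =>
    if PySem.Chars.isIn ['/'] cs then
      let parts := PySem.Chars.splitOnMax cs ['/'] 1       -- normalized.split("/", 1)
      let pre := parts.headD []
      let rest := (parts.drop 1).headD []
      let np := pvNormSeg pre
      if np == "aicodewith".toList then pvALoop route fuel rest
      else if (route == "anthropic") &&
          PySem.Set.contains (PySem.Set.ofList ["anthropic".toList, "claude".toList]) np then
        pvALoop route fuel rest
      else if (route == "gemini") &&
          PySem.Set.contains (PySem.Set.ofList ["gemini".toList, "google".toList]) np then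
        pvALoop route fuel rest
      else if (route == "openai") &&
          PySem.Set.contains (PySem.Set.ofList ["openai".toList, "chatgpt".toList]) np then
        pvALoop route fuel rest
      else cs
    else cs

def normalize_model_for_route_py (model : String) (route : String) : String :=
  String.mk (pvALoop route (model.toList.length + 1) model.toList)

-- ===== PORT B =====
-- the module-level frozenset _ROUTE_PREFIXES of Source B
def pvRoutePrefixes : PySem.Set (String × List Char) :=
  PySem.Set.ofList
    [("anthropic", "anthropic".toList), ("anthropic", "claude".toList),
     ("gemini", "gemini".toList), ("gemini", "google".toList),
     ("openai", "openai".toList), ("openai", "chatgpt".toList)]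

-- the index walk `while i < len(parts) - 1: … i += 1` / `return "/".join(parts[i:])`,
-- written as structural recursion on the segment list (the suffix parts[i:])
def pvBWalk (route : String) : List (List Char) → List (List Char)
  | p :: q :: rest =>
    let seg := pvNormSeg p
    if !(seg == "aicodewith".toList) && !(PySem.Set.contains pvRoutePrefixes (route, seg)) then
      p :: q :: rest
    else
      pvBWalk route (q :: rest)
  | parts => parts

def normalize_model_for_route_py_alt (model : String) (route : String) : String :=
  String.mk (PySem.Chars.join ['/'] (pvBWalk route (PySem.Chars.splitOn model.toList ['/'])))

-- ===== PRECONDITION & SPEC =====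
def Spec_normalize_model_for_route_py (model : String) (route : String) (out : String) : Prop := out = normalize_model_for_route_py_alt model route
instance (model : String) (route : String) (out : String) : Decidable (Spec_normalize_model_for_route_py model route out) := by unfold Spec_normalize_model_for_route_py; infer_instance

-- ===== CLAIM (what is proved, stated in full; the proofs are below) =====
def Claim_equal_normalize_model_for_route_py : Prop := ∀ (model : String) (route : String), Dom_normalize_model_for_route_py model route → Spec_normalize_model_for_route_py model route (normalize_model_for_route_py model route)

-- ===== LEMMAS AND PROOFS =====

-- proof-side specification of splitting on '/': accumulate the current segment explicitly
def pvSplit (acc0 : List Char) : List Char → List (List Char)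
  | [] => [acc0]
  | c :: rest => if c = '/' then acc0 :: pvSplit [] rest else pvSplit (acc0 ++ [c]) rest

lemma pvSplit_ne_nil (acc0 l : List Char) : pvSplit acc0 l ≠ [] := by
  induction l generalizing acc0 with
  | nil => simp [pvSplit]
  | cons c rest ih => simp only [pvSplit]; split <;> simp [ih]

lemma pvSplit_join (acc0 l : List Char) :
    PySem.Chars.join ['/'] (pvSplit acc0 l) = acc0 ++ l := by
  induction l generalizing acc0 with
  | nil => simp [pvSplit, PySem.Chars.join_singleton]
  | cons c rest ih =>
    simp only [pvSplit]
    by_cases hc : c = '/'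
    · subst hc
      obtain ⟨q, qs, hq⟩ : ∃ q qs, pvSplit ([] : List Char) rest = q :: qs := by
        cases h : pvSplit ([] : List Char) rest with
        | nil => exact absurd h (pvSplit_ne_nil _ _)
        | cons q qs => exact ⟨q, qs, rfl⟩
      rw [if_pos rfl, hq, PySem.Chars.join_cons_cons, ← hq, ih]
      simp
    · rw [if_neg hc, ih]; simp

lemma pvSplit_no_slash (acc0 l : List Char) (h : '/' ∉ acc0) :
    ∀ p ∈ pvSplit acc0 l, '/' ∉ p := by
  induction l generalizing acc0 with
  | nil => simpa [pvSplit] using h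
  | cons c rest ih =>
    simp only [pvSplit]
    by_cases hc : c = '/'
    · subst hc; rw [if_pos rfl]
      intro p hp
      rcases List.mem_cons.mp hp with rfl | hp
      · exact h
      · exact ih [] (by simp) p hp
    · rw [if_neg hc]
      exact ih (acc0 ++ [c]) (by simp [h, Ne.symm hc]) 

lemma pvSplit_length (acc0 l : List Char) : (pvSplit acc0 l).length ≤ l.length + 1 := by
  induction l generalizing acc0 with
  | nil => simp [pvSplit]
  | cons c rest ih =>
    simp only [pvSplit]; split
    · simpa using Nat.succ_le_succ (ih [])
    · exact (ih (acc0 ++ [c])).trans (by simp)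

-- PySem.Chars.splitOn with separator "/" computes pvSplit
lemma splitOn_go_eq (l : List Char) : ∀ (fuel : Nat) (cur : List Char) (acc : List (List Char)),
    l.length ≤ fuel →
    PySem.Chars.splitOn.go ['/'] fuel l cur acc = acc.reverse ++ pvSplit cur.reverse l := by
  induction l with
  | nil =>
    intro fuel cur acc _
    cases fuel <;> simp [PySem.Chars.splitOn.go, pvSplit]
  | cons c rest ih =>
    intro fuel cur acc hf
    simp only [List.length_cons] at hf
    cases fuel with
    | zero => omega
    | succ f =>
      by_cases hc : c = '/'
      · subst hc
        have hpre : (['/'].isPrefixOf ('/' :: rest)) = true := by simp [List.isPrefixOf]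
        simp only [PySem.Chars.splitOn.go, hpre, if_true, List.length_singleton,
          List.drop_succ_cons, List.drop_zero]
        rw [ih f [] (cur.reverse :: acc) (by omega)]
        simp [pvSplit]
      · have hpre : (['/'].isPrefixOf (c :: rest)) = false := by
          simp [List.isPrefixOf]; exact fun h => hc h.symm
        simp only [PySem.Chars.splitOn.go, hpre, Bool.false_eq_true, if_false]
        rw [ih f (c :: cur) acc (by omega)]
        simp [pvSplit, hc]

lemma splitOn_eq (cs : List Char) :
    PySem.Chars.splitOn cs ['/'] = pvSplit [] cs := by
  unfold PySem.Chars.splitOn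
  rw [splitOn_go_eq cs (cs.length + 1) [] [] (by omega)]
  simp

-- splitOnMax …  1 at the first '/' (with a slash-free prefix)
lemma splitOnMax_go_zero : ∀ (fuel : Nat) (l cur : List Char) (acc : List (List Char)),
    PySem.Chars.splitOnMax.go ['/'] fuel 0 l cur acc = ((cur.reverse ++ l) :: acc).reverse := by
  intro fuel l cur acc
  cases fuel <;> cases l <;> simp [PySem.Chars.splitOnMax.go]

lemma splitOnMax_go_one (p : List Char) : ∀ (t : List Char) (fuel : Nat) (cur : List Char)
    (acc : List (List Char)), '/' ∉ p → p.length + 1 ≤ fuel →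
    PySem.Chars.splitOnMax.go ['/'] fuel 1 (p ++ '/' :: t) cur acc
      = acc.reverse ++ [cur.reverse ++ p, t] := by
  induction p with
  | nil =>
    intro t fuel cur acc _ hf
    cases fuel with
    | zero => omega
    | succ f =>
      have hpre : (['/'].isPrefixOf ('/' :: t)) = true := by simp [List.isPrefixOf]
      simp only [List.nil_append, PySem.Chars.splitOnMax.go, hpre, if_true,
        List.length_singleton, List.drop_succ_cons, List.drop_zero]
      rw [if_neg (by omega)]
      rw [splitOnMax_go_zero]
      simp
  | cons c p' ih =>
    intro t fuel cur acc hp hf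
    have hc : c ≠ '/' := fun h => hp (by simp [h])
    simp only [List.length_cons] at hf
    cases fuel with
    | zero => omega
    | succ f =>
      have hpre : (['/'].isPrefixOf (c :: (p' ++ '/' :: t))) = false := by
        simp [List.isPrefixOf]; exact fun h => hc h.symm
      simp only [List.cons_append, PySem.Chars.splitOnMax.go, hpre, Bool.false_eq_true, if_false]
      rw [if_neg (by omega)]
      rw [ih t f (c :: cur) acc (fun h => hp (by simp [h])) (by omega)]
      simp

lemma splitOnMax_one (p t : List Char) (hp : '/' ∉ p) :
    PySem.Chars.splitOnMax (p ++ '/' :: t) ['/'] 1 = [p, t] := by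
  unfold PySem.Chars.splitOnMax
  rw [if_neg (by omega)]
  have h1 : ((1 : Int)).toNat = 1 := rfl
  rw [h1, splitOnMax_go_one p t ((p ++ '/' :: t).length + 1) [] [] hp (by simp)]
  simp

-- the '/'-membership test of the while loop
lemma isIn_slash_true {cs : List Char} (h : '/' ∈ cs) : PySem.Chars.isIn ['/'] cs = true :=
  (PySem.Chars.isIn_iff_infix _ _).mpr ((List.singleton_infix_iff _ _).mpr h)

lemma isIn_slash_false {cs : List Char} (h : '/' ∉ cs) : PySem.Chars.isIn ['/'] cs = false :=
  (PySem.Chars.isIn_eq_false_iff _ _).mpr (fun hi => h ((List.singleton_infix_iff _ _).mp hi))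

-- membership in B's (route, prefix) set, spelt out
lemma mem_pvRoutePrefixes (x : String × List Char) :
    x ∈ pvRoutePrefixes ↔ x ∈
      [("anthropic", "anthropic".toList), ("anthropic", "claude".toList),
       ("gemini", "gemini".toList), ("gemini", "google".toList),
       ("openai", "openai".toList), ("openai", "chatgpt".toList)] := by
  unfold pvRoutePrefixes
  exact PySem.Set.mem_ofList _ _

-- the propositional shuffle behind cond_eq, on abstract atoms
lemma pv_or_shuffle (A R1 R2 R3 B1 B2 C1 C2 D1 D2 : Prop) :
    (((A ∨ R1 ∧ (B1 ∨ B2)) ∨ R2 ∧ (C1 ∨ C2)) ∨ R3 ∧ (D1 ∨ D2)) ↔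
      (A ∨ R1 ∧ B1 ∨ R1 ∧ B2 ∨ R2 ∧ C1 ∨ R2 ∧ C2 ∨ R3 ∧ D1 ∨ R3 ∧ D2) := by
  tauto

-- A's prefix cascade tests the same condition as B's (route, segment) set
lemma cond_eq (route : String) (np : List Char) :
    ((np == "aicodewith".toList)
      || (route == "anthropic") &&
          PySem.Set.contains (PySem.Set.ofList ["anthropic".toList, "claude".toList]) np
      || (route == "gemini") &&
          PySem.Set.contains (PySem.Set.ofList ["gemini".toList, "google".toList]) np
      || (route == "openai") &&
          PySem.Set.contains (PySem.Set.ofList ["openai".toList, "chatgpt".toList]) np)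
    = !(!(np == "aicodewith".toList) && !(PySem.Set.contains pvRoutePrefixes (route, np))) := by
  rw [Bool.eq_iff_iff]
  simp only [Bool.or_eq_true, Bool.and_eq_true, Bool.not_and, Bool.not_not,
    beq_iff_eq, PySem.Set.contains_iff, PySem.Set.mem_ofList, mem_pvRoutePrefixes,
    List.mem_cons, List.not_mem_nil, or_false, Prod.mk.injEq]
  exact pv_or_shuffle _ _ _ _ _ _ _ _ _ _

-- a four-branch cascade with a common 'then' collapses to one disjunction
lemma ite4 {α : Sort _} (c1 c2 c3 c4 : Bool) (x y : α) :
    (if c1 then x else if c2 then x else if c3 then x else if c4 then x else y)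
      = if c1 || c2 || c3 || c4 then x else y := by
  cases c1 <;> cases c2 <;> cases c3 <;> cases c4 <;> simp

-- the heart: A's loop over the joined segments is B's index walk
lemma loop_eq_walk (route : String) : ∀ (parts : List (List Char)) (fuel : Nat),
    (∀ p ∈ parts, '/' ∉ p) → parts.length ≤ fuel →
    pvALoop route fuel (PySem.Chars.join ['/'] parts)
      = PySem.Chars.join ['/'] (pvBWalk route parts) := by
  intro parts
  induction parts with
  | nil =>
    intro fuel _ _
    cases fuel with
    | zero => simp [pvALoop, pvBWalk, PySem.Chars.join_nil]
    | succ f =>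
      simp only [PySem.Chars.join_nil, pvALoop, pvBWalk]
      rw [if_neg (by simp [isIn_slash_false (by simp : '/' ∉ ([] : List Char))])]
  | cons p ps ih =>
    intro fuel hns hf
    cases fuel with
    | zero => simp at hf
    | succ f =>
      cases ps with
      | nil =>
        rw [PySem.Chars.join_singleton]
        simp only [pvALoop, pvBWalk]
        rw [if_neg (by simp [isIn_slash_false (hns p (by simp))]),
          PySem.Chars.join_singleton]
      | cons q rest =>
        have hp : '/' ∉ p := hns p (by simp)
        rw [PySem.Chars.join_cons_cons]
        have hmem : '/' ∈ p ++ ['/'] ++ PySem.Chars.join ['/'] (q :: rest) := by simp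
        simp only [pvALoop]
        rw [if_pos (by simpa using isIn_slash_true hmem)]
        have hsplit : PySem.Chars.splitOnMax
            (p ++ ['/'] ++ PySem.Chars.join ['/'] (q :: rest)) ['/'] 1
            = [p, PySem.Chars.join ['/'] (q :: rest)] := by
          rw [List.append_assoc]
          exact splitOnMax_one p _ hp
        rw [hsplit]
        simp only [List.headD, List.drop, ite4, cond_eq]
        rw [pvBWalk]
        cases hstop : (!(pvNormSeg p == "aicodewith".toList)
            && !(PySem.Set.contains pvRoutePrefixes (route, pvNormSeg p))) with
        | true =>
          simp [PySem.Chars.join_cons_cons]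
        | false =>
          simp only [Bool.not_false, if_true, Bool.false_eq_true, if_false]
          exact ih f (fun x hx => hns x (by simp [hx])) (by simp at hf ⊢; omega)

-- ===== VERDICT (by name: the statement is the Claim_ definition above) =====
theorem normalize_model_for_route_py_spec : Claim_equal_normalize_model_for_route_py := by
  intro model route _
  unfold Spec_normalize_model_for_route_py normalize_model_for_route_py
    normalize_model_for_route_py_alt
  rw [splitOn_eq]
  congr 1
  have hjoin := pvSplit_join [] model.toList
  have hlen : (pvSplit [] model.toList).length ≤ model.toList.length + 1 :=
    pvSplit_length [] model.toList
  calc pvALoop route (model.toList.length + 1) model.toList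
      = pvALoop route (model.toList.length + 1)
          (PySem.Chars.join ['/'] (pvSplit [] model.toList)) := by rw [hjoin]; rfl
    _ = PySem.Chars.join ['/'] (pvBWalk route (pvSplit [] model.toList)) :=
        loop_eq_walk route _ _ (pvSplit_no_slash [] model.toList (by simp)) hlen
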